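-- pv_equiv track=rewrite | github.com/LarisaOvchinnikova/Python | codewars python/strings/Start with a Vowel.py | vowel_start
-- ===== SOURCE A (Python) =====
-- def vowel_start(st):
--     s = st.lower().replace(" ", "")
--     s = "".join([el for el in s if el.isalnum()])
--     if s == "": return ""
--     vowels = "aeuio"
--     res = []
--     word = s[0]
--     for i in range(1,len(s)):
--         if s[i] not in vowels:
--             word += s[i]
--         else:
--             res.append(word)
--             word = s[i]
--     res.append(word)
--     return " ".join(res)
-- ===== SOURCE B (Python) =====
-- def vowel_start(st):
--     s = "".join(c for c in st.lower().replace(" ", "") if c.isalnum())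
--     out = []
--     for i, c in enumerate(s):
--         if i and c in "aeiou":
--             out.append(" ")
--         out.append(c)
--     return "".join(out)
-- ===== Notes on version B (the rewrite author's own statement) =====
-- stated objective: simpler
-- what changed: A accumulates a growing current-segment buffer plus a list of segments and joins them with spaces; B makes one enumerate pass over the cleaned string, emitting each character and inserting a space before every vowel at index >= 1 (no segment buffer, no segment list, no join over segments).
import Mathlib
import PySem

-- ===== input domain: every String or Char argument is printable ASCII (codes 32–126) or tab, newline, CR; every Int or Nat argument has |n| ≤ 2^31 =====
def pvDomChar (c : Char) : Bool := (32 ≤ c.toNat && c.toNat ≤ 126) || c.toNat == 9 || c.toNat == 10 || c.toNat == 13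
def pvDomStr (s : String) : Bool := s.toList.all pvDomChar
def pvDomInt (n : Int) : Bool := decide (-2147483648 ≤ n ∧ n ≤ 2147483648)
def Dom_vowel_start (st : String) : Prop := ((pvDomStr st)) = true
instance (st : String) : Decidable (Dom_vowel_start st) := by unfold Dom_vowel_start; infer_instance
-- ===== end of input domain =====

-- B replaces A's segment-accumulator loop and final join with a single enumerate pass that
-- inserts a space before each vowel at index ≥ 1 (objective: simpler — no segment buffer, no segment list).

-- ===== PORT A =====
def vowel_start (st : String) : String :=
  let s0 := PySem.Chars.replace (PySem.Chars.lower st.toList) [' '] []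
  let s := s0.filter PySem.Chars.isalnum
  if s = [] then ""
  else
    let r := (PySem.List.pyRange 1 (PySem.List.len s)).foldl
      (fun (acc : List (List Char) × List Char) (i : Int) =>
        if PySem.List.pyGetD s i ' ' ∈ "aeuio".toList then (acc.1 ++ [acc.2], [PySem.List.pyGetD s i ' '])
        else (acc.1, acc.2 ++ [PySem.List.pyGetD s i ' ']))
      ([], [PySem.List.pyGetD s 0 ' '])
    String.mk (PySem.Chars.join [' '] (r.1 ++ [r.2]))

-- ===== PORT B =====
def vowel_start_alt (st : String) : String :=
  let s := (PySem.Chars.replace (PySem.Chars.lower st.toList) [' '] []).filter PySem.Chars.isalnum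
  String.mk <| (PySem.List.enumerate s).foldl
    (fun out (p : Int × Char) =>
      (if p.1 ≠ 0 ∧ p.2 ∈ "aeiou".toList then out ++ [' '] else out) ++ [p.2]) []

-- ===== PRECONDITION & SPEC =====
def Spec_vowel_start (st : String) (out : String) : Prop := out = vowel_start_alt st
instance (st : String) (out : String) : Decidable (Spec_vowel_start st out) := by unfold Spec_vowel_start; infer_instance

-- ===== CLAIM (what is proved, stated in full; the proofs are below) =====
def Claim_equal_vowel_start : Prop := ∀ (st : String), Dom_vowel_start st → Spec_vowel_start st (vowel_start st)

-- ===== LEMMAS AND PROOFS =====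

-- per-character contribution of B's pass at indices ≥ 1
def pvH (c : Char) : List Char := if c ∈ "aeuio".toList then [' ', c] else [c]

lemma mem_vowels (c : Char) : c ∈ "aeiou".toList ↔ c ∈ "aeuio".toList := by
  simp
  tauto

lemma join_cons_of_ne_nil (sep p : List Char) (l : List (List Char)) (h : l ≠ []) :
    PySem.Chars.join sep (p :: l) = p ++ sep ++ PySem.Chars.join sep l := by
  cases l with
  | nil => exact absurd rfl h
  | cons q rest => exact PySem.Chars.join_cons_cons sep p q rest

lemma join_append_one (sep x : List Char) (l : List (List Char)) (h : l ≠ []) :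
    PySem.Chars.join sep (l ++ [x]) = PySem.Chars.join sep l ++ sep ++ x := by
  induction l with
  | nil => exact absurd rfl h
  | cons p l' ih =>
    cases l' with
    | nil => simp [PySem.Chars.join_cons_cons, PySem.Chars.join_singleton]
    | cons q rest =>
      rw [List.cons_append, join_cons_of_ne_nil sep p _ (by simp),
        ih (by simp), join_cons_of_ne_nil sep p _ (by simp)]
      simp [List.append_assoc]

lemma join_last_extend (sep : List Char) (c : Char) :
    ∀ (res : List (List Char)) (word : List Char),
      PySem.Chars.join sep (res ++ [word ++ [c]]) = PySem.Chars.join sep (res ++ [word]) ++ [c] := by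
  intro res
  induction res with
  | nil => intro word; simp [PySem.Chars.join_singleton]
  | cons p res' ih =>
    intro word
    rw [List.cons_append, join_cons_of_ne_nil sep p _ (by simp), ih,
      List.cons_append, join_cons_of_ne_nil sep p _ (by simp)]
    simp [List.append_assoc]

-- A's loop, folded over the tail characters directly
def pvStepA (acc : List (List Char) × List Char) (c : Char) : List (List Char) × List Char :=
  if c ∈ "aeuio".toList then (acc.1 ++ [acc.2], [c]) else (acc.1, acc.2 ++ [c])

lemma a_loop_eq_flatMap (rest : List Char) :
    ∀ (res : List (List Char)) (word : List Char),
      PySem.Chars.join [' ']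
        ((rest.foldl pvStepA (res, word)).1 ++ [(rest.foldl pvStepA (res, word)).2]) =
      PySem.Chars.join [' '] (res ++ [word]) ++ rest.flatMap pvH := by
  induction rest with
  | nil => intro res word; simp
  | cons c rest ih =>
    intro res word
    by_cases hc : c ∈ "aeuio".toList
    · rw [List.foldl_cons, show pvStepA (res, word) c = (res ++ [word], [c]) from by
        unfold pvStepA; rw [if_pos hc], ih,
        join_append_one [' '] [c] (res ++ [word]) (by simp),
        List.flatMap_cons, show pvH c = [' ', c] from by unfold pvH; rw [if_pos hc]]
      simp [List.append_assoc]
    · rw [List.foldl_cons, show pvStepA (res, word) c = (res, word ++ [c]) from by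
        unfold pvStepA; rw [if_neg hc], ih, join_last_extend,
        List.flatMap_cons, show pvH c = [c] from by unfold pvH; rw [if_neg hc]]
      simp [List.append_assoc]

-- B's fold over enumerate s k for k ≥ 1: the index test is always true
lemma b_loop_eq_flatMap (rest : List Char) :
    ∀ (k : Int) (out : List Char), 1 ≤ k →
      (PySem.List.enumerate rest k).foldl
        (fun out (p : Int × Char) =>
          (if p.1 ≠ 0 ∧ p.2 ∈ "aeiou".toList then out ++ [' '] else out) ++ [p.2]) out =
      out ++ rest.flatMap pvH := by
  induction rest with
  | nil => intro k out _; simp [PySem.List.enumerate]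
  | cons c rest ih =>
    intro k out hk
    rw [show PySem.List.enumerate (c :: rest) k = (k, c) :: PySem.List.enumerate rest (k + 1)
      from rfl, List.foldl_cons, ih (k + 1) _ (by omega)]
    have hk0 : (k : Int) ≠ 0 := by omega
    by_cases hc : c ∈ "aeiou".toList
    · rw [if_pos ⟨hk0, hc⟩, List.flatMap_cons,
        show pvH c = [' ', c] from by unfold pvH; rw [if_pos ((mem_vowels c).mp hc)]]
      simp [List.append_assoc]
    · rw [if_neg (by tauto), List.flatMap_cons,
        show pvH c = [c] from by unfold pvH; rw [if_neg (fun h => hc ((mem_vowels c).mpr h))]]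
      simp [List.append_assoc]

lemma core (s : List Char) :
    (if s = [] then ""
     else
       let r := (PySem.List.pyRange 1 (PySem.List.len s)).foldl
          (fun (acc : List (List Char) × List Char) (i : Int) =>
            if PySem.List.pyGetD s i ' ' ∈ "aeuio".toList then (acc.1 ++ [acc.2], [PySem.List.pyGetD s i ' '])
            else (acc.1, acc.2 ++ [PySem.List.pyGetD s i ' ']))
          ([], [PySem.List.pyGetD s 0 ' '])
       String.mk (PySem.Chars.join [' '] (r.1 ++ [r.2]))) =
    (String.mk <| (PySem.List.enumerate s).foldl
      (fun out (p : Int × Char) =>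
        (if p.1 ≠ 0 ∧ p.2 ∈ "aeiou".toList then out ++ [' '] else out) ++ [p.2]) []) := by
  cases s with
  | nil => rfl
  | cons c rest =>
    rw [if_neg (by simp)]
    show String.mk _ = _
    rw [show (fun (acc : List (List Char) × List Char) (i : Int) =>
        if PySem.List.pyGetD (c :: rest) i ' ' ∈ "aeuio".toList then
          (acc.1 ++ [acc.2], [PySem.List.pyGetD (c :: rest) i ' '])
        else (acc.1, acc.2 ++ [PySem.List.pyGetD (c :: rest) i ' '])) =
      (fun acc j => pvStepA acc (PySem.List.pyGetD (c :: rest) j ' ')) from rfl,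
      PySem.List.foldl_pyRange_pyGetD (a := 1) (c :: rest) ' ' pvStepA
      ([], [PySem.List.pyGetD (c :: rest) 0 ' ']) (by norm_num)]
    rw [show PySem.List.pyGetD (c :: rest) 0 ' ' = c from PySem.List.pyGetD_zero_cons c rest ' ',
      show List.drop (1 : Int).toNat (c :: rest) = rest from rfl,
      a_loop_eq_flatMap rest [] [c],
      show PySem.List.enumerate (c :: rest) 0 = (0, c) :: PySem.List.enumerate rest 1 from rfl,
      List.foldl_cons,
      show ((if (0 : Int) ≠ 0 ∧ c ∈ "aeiou".toList then ([] : List Char) ++ [' '] else []) ++ [c]) = [c]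
        from by rw [if_neg (by simp)]; rfl,
      b_loop_eq_flatMap rest 1 [c] (by norm_num)]
    simp [PySem.Chars.join_singleton]

-- ===== VERDICT (by name: the statement is the Claim_ definition above) =====
theorem vowel_start_spec : Claim_equal_vowel_start := by
  intro st _
  show vowel_start st = vowel_start_alt st
  exact core ((PySem.Chars.replace (PySem.Chars.lower st.toList) [' '] []).filter PySem.Chars.isalnum)
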